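-- pv_equiv track=rewrite | github.com/kobeomseok95/remind-algorithm | python/boj/silver/15787.py | solution
-- ===== SOURCE A (Python) =====
-- def solution(trains_count, commands):
--     trains = [0] * (trains_count + 1)
--     for command in commands:
--         order_number, train_number = command[0], command[1]
--         if order_number == 1:
--             trains[train_number] |= (1 << (command[2] - 1))
--         elif order_number == 2:
--             trains[train_number] &= ~(1 << (command[2] - 1))
--         elif order_number == 3:
--             trains[train_number] = trains[train_number] << 1
--             trains[train_number] &= ((1 << 20) - 1)
--         elif order_number == 4:
--             trains[train_number] = trains[train_number] >> 1
--     return len(set(trains[1:]))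
-- ===== SOURCE B (Python) =====
-- def solution(trains_count, commands):
--     # Group commands by train once, then reduce each train's own command
--     # stream independently; no mutable state array.
--     groups = {}
--     for c in commands:
--         groups.setdefault(c[1], []).append(c)
--
--     def final_mask(cs):
--         mask = 0
--         for c in cs:
--             op = c[0]
--             if op == 1:
--                 mask |= 1 << (c[2] - 1)
--             elif op == 2:
--                 mask &= ~(1 << (c[2] - 1))
--             elif op == 3:
--                 mask = (mask << 1) & ((1 << 20) - 1)
--             elif op == 4:
--                 mask >>= 1
--         return mask
--
--     return len({final_mask(groups.get(t, [])) for t in range(1, trains_count + 1)})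
-- ===== Notes on version B (the rewrite author's own statement) =====
-- stated objective: alternative
-- what changed: B replaces A's mutable state array updated command-by-command with a one-pass group-by of the commands per train followed by an independent pure fold over each train's own command stream (no array).
-- outside the precondition, e.g. on solution(2, [[1, -1, 3]]): A returns 2, B returns 1
import Mathlib
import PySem

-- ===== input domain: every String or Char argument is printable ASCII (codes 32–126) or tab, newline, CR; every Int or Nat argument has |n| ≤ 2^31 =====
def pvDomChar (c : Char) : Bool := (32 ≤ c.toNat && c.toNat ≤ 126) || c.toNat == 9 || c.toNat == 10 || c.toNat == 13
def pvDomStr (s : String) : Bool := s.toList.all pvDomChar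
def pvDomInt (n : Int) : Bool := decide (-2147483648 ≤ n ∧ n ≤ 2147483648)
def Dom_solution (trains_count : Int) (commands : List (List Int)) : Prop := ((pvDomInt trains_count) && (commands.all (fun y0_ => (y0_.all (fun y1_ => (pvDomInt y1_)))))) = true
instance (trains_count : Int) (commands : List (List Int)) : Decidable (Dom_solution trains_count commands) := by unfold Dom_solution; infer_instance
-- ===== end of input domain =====

-- B replaces A's mutable state array updated command-by-command with a one-pass group-by of the
-- commands per train followed by an independent pure fold over each train's own command stream.
-- Return-value equivalence only; neither version mutates its arguments.

-- ===== PORT A =====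
-- one iteration of A's `for command in commands` loop over the state list `trains`
-- (read trains[t] then write it back = pyGetD/pySetD; exact on Pre_, where the index is in range
-- and the shift amount command[2]-1 is nonnegative, so .toNat does not clamp)
def solutionStep (trains : List Int) (command : List Int) : List Int :=
  if PySem.List.pyGetD command 0 0 = 1 then
    PySem.List.pySetD trains (PySem.List.pyGetD command 1 0)
      (PySem.Int.bor (PySem.List.pyGetD trains (PySem.List.pyGetD command 1 0) 0)
        ((1 : Int) <<< (PySem.List.pyGetD command 2 0 - 1).toNat))
  else if PySem.List.pyGetD command 0 0 = 2 then
    PySem.List.pySetD trains (PySem.List.pyGetD command 1 0)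
      (PySem.Int.band (PySem.List.pyGetD trains (PySem.List.pyGetD command 1 0) 0)
        (Int.not ((1 : Int) <<< (PySem.List.pyGetD command 2 0 - 1).toNat)))
  else if PySem.List.pyGetD command 0 0 = 3 then
    -- two statements in A: shift in place, then mask in place (the first write inlined)
    PySem.List.pySetD (PySem.List.pySetD trains (PySem.List.pyGetD command 1 0)
        (PySem.List.pyGetD trains (PySem.List.pyGetD command 1 0) 0 <<< 1))
      (PySem.List.pyGetD command 1 0)
      (PySem.Int.band
        (PySem.List.pyGetD (PySem.List.pySetD trains (PySem.List.pyGetD command 1 0)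
            (PySem.List.pyGetD trains (PySem.List.pyGetD command 1 0) 0 <<< 1))
          (PySem.List.pyGetD command 1 0) 0)
        (((1 : Int) <<< 20) - 1))
  else if PySem.List.pyGetD command 0 0 = 4 then
    PySem.List.pySetD trains (PySem.List.pyGetD command 1 0) (PySem.List.pyGetD trains (PySem.List.pyGetD command 1 0) 0 >>> 1)
  else trains

def solution (trains_count : Int) (commands : List (List Int)) : Int :=
  let trains := List.replicate (trains_count + 1).toNat 0   -- [0] * (trains_count + 1)
  let trains := commands.foldl solutionStep trains
  PySem.List.len (PySem.Set.ofList (PySem.List.slice trains (some 1) none))  -- len(set(trains[1:]))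

-- ===== PORT B =====
-- groups.setdefault(c[1], []).append(c)  (= Dict.modify: d[k] = d.get(k, []) + [c])
def altGroups (commands : List (List Int)) : PySem.Dict Int (List (List Int)) :=
  commands.foldl (fun groups (c : List Int) =>
    PySem.Dict.modify groups (PySem.List.pyGetD c 1 0) [] (· ++ [c])) PySem.Dict.empty

-- final_mask(cs): pure fold over one train's own command stream
def altFinalMask (cs : List (List Int)) : Int :=
  cs.foldl (fun (mask : Int) (c : List Int) =>
    if PySem.List.pyGetD c 0 0 = 1 then PySem.Int.bor mask ((1 : Int) <<< (PySem.List.pyGetD c 2 0 - 1).toNat)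
    else if PySem.List.pyGetD c 0 0 = 2 then PySem.Int.band mask (Int.not ((1 : Int) <<< (PySem.List.pyGetD c 2 0 - 1).toNat))
    else if PySem.List.pyGetD c 0 0 = 3 then PySem.Int.band (mask <<< 1) (((1 : Int) <<< 20) - 1)
    else if PySem.List.pyGetD c 0 0 = 4 then mask >>> 1
    else mask) 0

def solution_alt (trains_count : Int) (commands : List (List Int)) : Int :=
  let groups := altGroups commands
  let states := (PySem.List.pyRange 1 (trains_count + 1) 1).map
    (fun t => altFinalMask (PySem.Dict.getD groups t []))
  PySem.List.len (PySem.Set.ofList states)   -- len({ … for t in range(1, trains_count+1)})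

-- ===== PRECONDITION & SPEC =====
-- Pre_ excludes inputs where A raises (a command shorter than 2, a train index out of range for
-- ops 1-4, a missing or non-positive seat number for ops 1-2), and commands whose train number is
-- negative yet in wraparound range: there A's Python negative indexing silently acts on a train
-- counted from the end — a corner outside the problem's 1..n train numbering on which either
-- behaviour is defensible (B ignores such commands).
def Pre_solution (trains_count : Int) (commands : List (List Int)) : Prop :=
  ∀ c ∈ commands, 2 ≤ c.length ∧
    ((c.getD 0 0 = 1 ∨ c.getD 0 0 = 2 ∨ c.getD 0 0 = 3 ∨ c.getD 0 0 = 4) →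
      0 ≤ c.getD 1 0 ∧ c.getD 1 0 < trains_count + 1) ∧
    ((c.getD 0 0 = 1 ∨ c.getD 0 0 = 2) → 3 ≤ c.length ∧ 1 ≤ c.getD 2 0)

instance (trains_count : Int) (commands : List (List Int)) : Decidable (Pre_solution trains_count commands) := by
  unfold Pre_solution; infer_instance

def pvWitness_solution : Int × List (List Int) :=
  (3, [[1, 1, 3], [3, 1], [1, 2, 2], [4, 2], [2, 1, 4], [5, 9]])

def Spec_solution (trains_count : Int) (commands : List (List Int)) (out : Int) : Prop := out = solution_alt trains_count commands
instance (trains_count : Int) (commands : List (List Int)) (out : Int) : Decidable (Spec_solution trains_count commands out) := by unfold Spec_solution; infer_instance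

-- ===== CLAIM (what is proved, stated in full; the proofs are below) =====
def Claim_equal_solution : Prop := ∀ (trains_count : Int) (commands : List (List Int)), Dom_solution trains_count commands → Pre_solution trains_count commands → Spec_solution trains_count commands (solution trains_count commands)

-- ===== LEMMAS AND PROOFS =====

-- the effect of one command on the single train t (proof-only bridge between the two loops)
def stepIf (t : Int) (mask : Int) (c : List Int) : Int :=
  if PySem.List.pyGetD c 1 0 == t then
    if PySem.List.pyGetD c 0 0 = 1 then PySem.Int.bor mask ((1 : Int) <<< (PySem.List.pyGetD c 2 0 - 1).toNat)
    else if PySem.List.pyGetD c 0 0 = 2 then PySem.Int.band mask (Int.not ((1 : Int) <<< (PySem.List.pyGetD c 2 0 - 1).toNat))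
    else if PySem.List.pyGetD c 0 0 = 3 then PySem.Int.band (mask <<< 1) (((1 : Int) <<< 20) - 1)
    else if PySem.List.pyGetD c 0 0 = 4 then mask >>> 1
    else mask
  else mask

-- grouping loop, generalized over the starting dict
lemma getD_groups_aux (cs : List (List Int)) :
    ∀ (d : PySem.Dict Int (List (List Int))) (t : Int),
    (cs.foldl (fun groups (c : List Int) =>
        PySem.Dict.modify groups (PySem.List.pyGetD c 1 0) [] (· ++ [c])) d).getD t [] =
      d.getD t [] ++ cs.filter (fun c => PySem.List.pyGetD c 1 0 == t) := by
  induction cs with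
  | nil => intro d t; simp
  | cons c cs ih =>
    intro d t
    simp only [List.foldl_cons, List.filter_cons]
    rw [ih, PySem.Dict.getD_modify]
    by_cases h : PySem.List.pyGetD c 1 0 = t
    · simp [h]
    · simp [h, Ne.symm h]

-- grouping: the group of t is exactly the subsequence of commands addressed to t
lemma getD_altGroups (commands : List (List Int)) (t : Int) :
    PySem.Dict.getD (altGroups commands) t [] =
      commands.filter (fun c => PySem.List.pyGetD c 1 0 == t) := by
  unfold altGroups
  rw [getD_groups_aux]
  simp

-- B's per-train fold = fold of the guarded step over all commands
lemma altFinalMask_filter (commands : List (List Int)) (t : Int) :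
    altFinalMask (commands.filter (fun c => PySem.List.pyGetD c 1 0 == t)) =
      commands.foldl (stepIf t) 0 := by
  unfold altFinalMask stepIf
  exact (PySem.List.foldl_if_eq_foldl_filter (fun c => PySem.List.pyGetD c 1 0 == t) _ commands 0).symm

-- one step of A preserves the length of the state list
lemma length_solutionStep (L c : List Int) : (solutionStep L c).length = L.length := by
  unfold solutionStep
  split_ifs <;> simp [PySem.List.length_pySetD]

-- writing trains[tn] then reading any index i
lemma getD_pySetD (L : List Int) {tn : Int} (v : Int)
    (h0 : 0 ≤ tn) (hlt : tn < (L.length : Int)) (i : Nat) :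
    (PySem.List.pySetD L tn v).getD i 0 = if tn = (i : Int) then v else L.getD i 0 := by
  rw [PySem.List.pySetD_of_nonneg _ _ h0]
  simp only [List.getD_eq_getElem?_getD, List.getElem?_set]
  by_cases hti : tn = (i : Int)
  · have hnat : tn.toNat = i := by omega
    simp [hti, hnat, show i < L.length by omega]
  · have hnat : tn.toNat ≠ i := by omega
    simp [hti, hnat]

-- one step of A, read at index i, is the guarded step on the old value at i
lemma solutionStep_getD (L c : List Int)
    (h : (PySem.List.pyGetD c 0 0 = 1 ∨ PySem.List.pyGetD c 0 0 = 2 ∨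
            PySem.List.pyGetD c 0 0 = 3 ∨ PySem.List.pyGetD c 0 0 = 4) →
          0 ≤ PySem.List.pyGetD c 1 0 ∧ PySem.List.pyGetD c 1 0 < (L.length : Int))
    (i : Nat) :
    (solutionStep L c).getD i 0 = stepIf (i : Int) (L.getD i 0) c := by
  unfold solutionStep stepIf
  by_cases h1 : PySem.List.pyGetD c 0 0 = 1
  · obtain ⟨h0, hlt⟩ := h (Or.inl h1)
    rw [if_pos h1, getD_pySetD _ _ h0 hlt, PySem.List.pyGetD_of_nonneg _ _ h0]
    by_cases hti : PySem.List.pyGetD c 1 0 = (i : Int)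
    · have hnat : (PySem.List.pyGetD c 1 0).toNat = i := by omega
      simp [h1, hti, hnat]
    · simp [h1, hti]
  · rw [if_neg h1]
    by_cases h2 : PySem.List.pyGetD c 0 0 = 2
    · obtain ⟨h0, hlt⟩ := h (Or.inr (Or.inl h2))
      rw [if_pos h2, getD_pySetD _ _ h0 hlt, PySem.List.pyGetD_of_nonneg _ _ h0]
      by_cases hti : PySem.List.pyGetD c 1 0 = (i : Int)
      · have hnat : (PySem.List.pyGetD c 1 0).toNat = i := by omega
        simp [h1, h2, hti, hnat]
      · simp [h1, h2, hti]
    · rw [if_neg h2]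
      by_cases h3 : PySem.List.pyGetD c 0 0 = 3
      · obtain ⟨h0, hlt⟩ := h (Or.inr (Or.inr (Or.inl h3)))
        have hlt' : PySem.List.pyGetD c 1 0 <
            ((PySem.List.pySetD L (PySem.List.pyGetD c 1 0)
              (PySem.List.pyGetD L (PySem.List.pyGetD c 1 0) 0 <<< 1)).length : Int) := by
          rw [PySem.List.length_pySetD]; exact hlt
        rw [if_pos h3, getD_pySetD _ _ h0 hlt', PySem.List.pyGetD_of_nonneg _ _ h0,
          getD_pySetD _ _ h0 hlt, PySem.List.pyGetD_of_nonneg _ _ h0]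
        by_cases hti : PySem.List.pyGetD c 1 0 = (i : Int)
        · have hnat : (PySem.List.pyGetD c 1 0).toNat = i := by omega
          simp [h1, h2, h3, hti, hnat, getD_pySetD L _ h0 hlt,
            Int.toNat_of_nonneg h0]
        · rw [getD_pySetD L _ h0 hlt i, if_neg hti]
          simp [h3, hti]
      · rw [if_neg h3]
        by_cases h4 : PySem.List.pyGetD c 0 0 = 4
        · obtain ⟨h0, hlt⟩ := h (Or.inr (Or.inr (Or.inr h4)))
          rw [if_pos h4, getD_pySetD _ _ h0 hlt, PySem.List.pyGetD_of_nonneg _ _ h0]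
          by_cases hti : PySem.List.pyGetD c 1 0 = (i : Int)
          · have hnat : (PySem.List.pyGetD c 1 0).toNat = i := by omega
            simp [h1, h2, h3, h4, hti, hnat]
          · simp [h1, h2, h3, h4, hti]
        · rw [if_neg h4]
          by_cases hti : PySem.List.pyGetD c 1 0 = (i : Int) <;>
            simp [h1, h2, h3, h4, hti]

-- A's state list, read at one index, is the guarded fold at that index
lemma foldl_solutionStep_getD (cs : List (List Int)) (L : List Int)
    (h : ∀ c ∈ cs, (PySem.List.pyGetD c 0 0 = 1 ∨ PySem.List.pyGetD c 0 0 = 2 ∨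
            PySem.List.pyGetD c 0 0 = 3 ∨ PySem.List.pyGetD c 0 0 = 4) →
          0 ≤ PySem.List.pyGetD c 1 0 ∧ PySem.List.pyGetD c 1 0 < (L.length : Int))
    (i : Nat) :
    (cs.foldl solutionStep L).getD i 0 = cs.foldl (stepIf (i : Int)) (L.getD i 0) := by
  induction cs generalizing L with
  | nil => rfl
  | cons c cs ih =>
    simp only [List.foldl_cons]
    rw [ih _ (fun c' hc' => by
      simpa [length_solutionStep] using h c' (List.mem_cons_of_mem _ hc')),
      solutionStep_getD _ _ (h c List.mem_cons_self)]

-- A's whole loop preserves the length of the state list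
lemma length_foldl_solutionStep (cs : List (List Int)) (L : List Int) :
    (cs.foldl solutionStep L).length = L.length := by
  induction cs generalizing L with
  | nil => rfl
  | cons c cs ih => rw [List.foldl_cons, ih, length_solutionStep]

-- ===== VERDICT (by name: the statement is the Claim_ definition above) =====
theorem solution_spec : Claim_equal_solution := by
  unfold Claim_equal_solution
  intro n commands _ hpre
  unfold Spec_solution solution solution_alt
  dsimp only
  rw [PySem.List.slice_from_one]
  have hv : ∀ c ∈ commands, (PySem.List.pyGetD c 0 0 = 1 ∨ PySem.List.pyGetD c 0 0 = 2 ∨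
        PySem.List.pyGetD c 0 0 = 3 ∨ PySem.List.pyGetD c 0 0 = 4) →
      0 ≤ PySem.List.pyGetD c 1 0 ∧
        PySem.List.pyGetD c 1 0 < ((List.replicate (n + 1).toNat (0 : Int)).length : Int) := by
    intro c hc hop
    obtain ⟨-, hb, -⟩ := hpre c hc
    simp only [PySem.List.pyGetD_ofNat'] at hop ⊢
    obtain ⟨hb0, hb1⟩ := hb hop
    simp only [List.length_replicate]
    omega
  have hrep : ∀ j : Nat, (List.replicate (n + 1).toNat (0 : Int)).getD j 0 = 0 := by
    intro j
    simp only [List.getD_eq_getElem?_getD, List.getElem?_replicate]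
    split <;> rfl
  have hmain : (commands.foldl solutionStep (List.replicate (n + 1).toNat 0)).tail =
      (PySem.List.pyRange 1 (n + 1) 1).map
        (fun t => altFinalMask (PySem.Dict.getD (altGroups commands) t [])) := by
    apply List.ext_getElem
    · rw [List.length_tail, length_foldl_solutionStep, List.length_map,
        PySem.List.length_pyRange_one, List.length_replicate]
      omega
    · intro k hk1 hk2
      have hk1' : k + 1 < (commands.foldl solutionStep
          (List.replicate (n + 1).toNat 0)).length := by
        rw [length_foldl_solutionStep, List.length_replicate]
        rw [List.length_tail, length_foldl_solutionStep, List.length_replicate] at hk1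
        omega
      rw [List.getElem_tail, ← List.getD_eq_getElem _ 0 hk1',
        foldl_solutionStep_getD _ _ hv, hrep,
        List.getElem_map, PySem.List.getElem_pyRange_one,
        getD_altGroups, altFinalMask_filter]
      have hcast : (1 : Int) + (k : Int) = ((k + 1 : Nat) : Int) := by push_cast; ring
      rw [hcast]
  rw [hmain]
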